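-- pv_equiv track=rewrite | github.com/roszar351/Miscellaneous | Python/Codility/Lesson5_1.py | solution
-- ===== SOURCE A (Python) =====
-- def solution(A):
--     # write your code in Python 3.6
--     answer = 0
--     zerosPassed = 0
--
--     for i in A:
--         if i == 0:
--            zerosPassed += 1
--         else:
--             answer += zerosPassed
--             if answer > 1000000000:
--                 return -1
--
--     return answer
-- ===== SOURCE B (Python) =====
-- def solution(A):
--     # Combinatorial formula over zero positions: each zero at index k would pair with
--     # all n-1-k later elements, minus the later zeros; the total over-count of
--     # zero-zero pairs is C(z,2).  Overflow cap applied once at the end (total is monotone).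
--     n = len(A)
--     zidx = [k for k, v in enumerate(A) if v == 0]
--     z = len(zidx)
--     total = sum(n - 1 - k for k in zidx) - z * (z - 1) // 2
--     return -1 if total > 1000000000 else total
-- ===== Notes on version B (the rewrite author's own statement) =====
-- stated objective: alternative
-- what changed: B replaces A's running zeros-seen accumulation by a combinatorial formula: it collects the zero positions, sums n-1-k over them (all later elements) and subtracts the C(z,2) zero-zero pairs, applying the 1e9 cap once at the end.
import Mathlib
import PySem

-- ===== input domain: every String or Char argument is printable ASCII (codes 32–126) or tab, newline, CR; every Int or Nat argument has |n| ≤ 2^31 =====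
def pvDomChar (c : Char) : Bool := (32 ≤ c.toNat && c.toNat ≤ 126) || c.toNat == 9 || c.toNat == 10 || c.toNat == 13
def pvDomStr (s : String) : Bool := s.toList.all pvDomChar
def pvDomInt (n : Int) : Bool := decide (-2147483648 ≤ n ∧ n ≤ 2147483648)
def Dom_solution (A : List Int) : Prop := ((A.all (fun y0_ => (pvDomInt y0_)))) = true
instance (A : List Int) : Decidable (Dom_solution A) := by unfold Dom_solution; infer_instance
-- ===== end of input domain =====

-- B replaces A's running zeros-seen accumulation by a combinatorial formula over the
-- collected zero positions (sum of n-1-k minus C(z,2)), cap applied once at the end; alternative.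

-- ===== PORT A =====
-- A's loop with early return: state = (answer, zerosPassed); returning -1 stops the recursion.
def solutionLoop : List Int → Int → Int → Int
  | [], answer, _ => answer
  | i :: rest, answer, zeros =>
    if i == 0 then solutionLoop rest answer (zeros + 1)
    else
      if answer + zeros > 1000000000 then -1
      else solutionLoop rest (answer + zeros) zeros

def solution (A : List Int) : Int := solutionLoop A 0 0

-- ===== PORT B =====
def solution_alt (A : List Int) : Int :=
  let n : Int := A.length
  let zidx := (PySem.List.enumerate A 0).filterMap (fun p => if p.2 == 0 then some p.1 else none)
  let z : Int := zidx.length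
  let total := (zidx.map (fun k => n - 1 - k)).sum - PySem.Int.floordiv (z * (z - 1)) 2
  if total > 1000000000 then -1 else total

-- ===== PRECONDITION & SPEC =====
def Spec_solution (A : List Int) (out : Int) : Prop := out = solution_alt A
instance (A : List Int) (out : Int) : Decidable (Spec_solution A out) := by unfold Spec_solution; infer_instance

-- ===== CLAIM (what is proved, stated in full; the proofs are below) =====
def Claim_equal_solution : Prop := ∀ (A : List Int), Dom_solution A → Spec_solution A (solution A)

-- ===== LEMMAS AND PROOFS =====

-- Reference quantity: (pairs counted so far from the right, ones seen) as a foldr.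
def altFold (A : List Int) : Int × Int :=
  A.foldr (fun i (p : Int × Int) => if i == 0 then (p.1 + p.2, p.2) else (p.1, p.2 + 1)) (0, 0)

theorem altFold_nonneg (A : List Int) : 0 ≤ (altFold A).1 ∧ 0 ≤ (altFold A).2 := by
  induction A with
  | nil => simp [altFold]
  | cons i rest ih =>
    simp only [altFold, List.foldr] at *
    split <;> constructor <;> dsimp <;> omega

theorem altFold_cons (i : Int) (rest : List Int) :
    altFold (i :: rest) =
      (if i = 0 then ((altFold rest).1 + (altFold rest).2, (altFold rest).2)
       else ((altFold rest).1, (altFold rest).2 + 1)) := by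
  simp [altFold, List.foldr]

-- A's loop equals the fold-computed total with the cap.
theorem solutionLoop_eq (A : List Int) :
    ∀ answer zeros : Int, 0 ≤ answer → answer ≤ 1000000000 → 0 ≤ zeros →
      solutionLoop A answer zeros =
        (if answer + zeros * (altFold A).2 + (altFold A).1 > 1000000000 then -1
         else answer + zeros * (altFold A).2 + (altFold A).1) := by
  induction A with
  | nil =>
    intro answer zeros h0 h1 _
    simp [solutionLoop, altFold]
    omega
  | cons i rest ih =>
    intro answer zeros h0 h1 hz
    have hrest := altFold_nonneg rest
    by_cases hi : i = 0
    · have h := ih answer (zeros + 1) h0 h1 (by omega)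
      have e : answer + (zeros + 1) * (altFold rest).2 + (altFold rest).1
          = answer + zeros * (altFold rest).2 + ((altFold rest).1 + (altFold rest).2) := by ring
      rw [e] at h
      simp only [solutionLoop, hi, beq_self_eq_true, if_true, altFold_cons]
      exact h
    · simp only [solutionLoop, altFold_cons, beq_iff_eq, hi, if_false]
      by_cases hov : answer + zeros > 1000000000
      · rw [if_pos hov, if_pos]
        nlinarith [hrest.1, hrest.2, mul_nonneg hz hrest.2]
      · rw [if_neg hov]
        have h := ih (answer + zeros) zeros (by omega) (by omega) hz
        have e : answer + zeros + zeros * (altFold rest).2 + (altFold rest).1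
            = answer + zeros * ((altFold rest).2 + 1) + (altFold rest).1 := by ring
        rw [e] at h
        exact h

-- The zero-index list with an arbitrary enumeration start.
def zidxFrom (s : Int) (A : List Int) : List Int :=
  (PySem.List.enumerate A s).filterMap (fun p => if p.2 == 0 then some p.1 else none)

-- B's formula ingredients versus the fold, generalized over the start index.
theorem zidx_altFold (A : List Int) : ∀ s : Int,
    ((zidxFrom s A).length : Int) = ((A.countP (fun i => i == 0)) : Int) ∧
    (altFold A).2 = (A.length : Int) - ((A.countP (fun i => i == 0)) : Int) ∧
    2 * ((zidxFrom s A).map (fun k => (s + (A.length : Int)) - 1 - k)).sum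
      = 2 * (altFold A).1
        + ((A.countP (fun i => i == 0)) : Int) * (((A.countP (fun i => i == 0)) : Int) - 1) := by
  induction A with
  | nil => intro s; simp [zidxFrom, altFold, PySem.List.enumerate_nil]
  | cons i rest ih =>
    intro s
    obtain ⟨ihl, iho, ihs⟩ := ih (s + 1)
    have hfun : (fun k => (s + ((i :: rest).length : Int)) - 1 - k)
        = (fun k => ((s + 1) + (rest.length : Int)) - 1 - k) := by
      funext k; simp; ring
    by_cases hi : i = 0
    · subst hi
      have hz : zidxFrom s ((0:Int) :: rest) = s :: zidxFrom (s + 1) rest := by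
        simp [zidxFrom, PySem.List.enumerate_cons]
      have hc : (((((0:Int) :: rest).countP (fun i => i == 0)) : Nat) : Int)
          = ((rest.countP (fun i => i == 0)) : Int) + 1 := by
        simp
      refine ⟨?_, ?_, ?_⟩
      · rw [hz, hc]; simp [ihl]
      · rw [hc, altFold_cons]; simp only [reduceIte]
        simp only [List.length_cons, iho]; push_cast; ring
      · rw [hz, hc, altFold_cons]; simp only [reduceIte, hfun]
        simp only [List.map_cons, List.sum_cons]
        have hterm : ((s + 1) + (rest.length : Int)) - 1 - s = (rest.length : Int) := by ring
        rw [hterm]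
        have hout : (rest.length : Int) = (altFold rest).2 + ((rest.countP (fun i => i == 0)) : Int) := by
          rw [iho]; ring
        linear_combination ihs + 2 * hout
    · have hz : zidxFrom s (i :: rest) = zidxFrom (s + 1) rest := by
        simp [zidxFrom, PySem.List.enumerate_cons, hi]
      have hc : ((((i :: rest).countP (fun i => i == 0)) : Nat) : Int)
          = ((rest.countP (fun i => i == 0)) : Int) := by
        simp [hi]
      refine ⟨?_, ?_, ?_⟩
      · rw [hz, hc]; exact ihl
      · rw [hc, altFold_cons]; simp only [if_neg hi]
        simp only [List.length_cons, iho]; push_cast; ring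
      · rw [hz, hc, altFold_cons]; simp only [if_neg hi, hfun]
        exact ihs

-- ===== VERDICT (by name: the statement is the Claim_ definition above) =====
theorem solution_spec : Claim_equal_solution := by
  intro A _
  show solution A = solution_alt A
  have hA := solutionLoop_eq A 0 0 le_rfl (by norm_num) le_rfl
  obtain ⟨hl, _, hs⟩ := zidx_altFold A 0
  have hzero : ∀ k : Int, (0 : Int) + (A.length : Int) - 1 - k = (A.length : Int) - 1 - k := by
    intro k; ring
  simp only [solution, solution_alt, hA, zero_mul, zero_add]
  have hsum : ((zidxFrom 0 A).map (fun k => (A.length : Int) - 1 - k)).sum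
      = (altFold A).1 + PySem.Int.floordiv
          ((((zidxFrom 0 A).length : Int)) * (((zidxFrom 0 A).length : Int) - 1)) 2 := by
    rw [PySem.Int.floordiv_eq_ediv_of_pos (by norm_num)]
    have hs' : 2 * ((zidxFrom 0 A).map (fun k => (A.length : Int) - 1 - k)).sum
        = 2 * (altFold A).1 + ((zidxFrom 0 A).length : Int) * (((zidxFrom 0 A).length : Int) - 1) := by
      rw [hl]
      have := hs
      simp only [hzero] at this ⊢
      convert this using 3
    omega
  show (if _ then _ else _) = _
  rw [show ((PySem.List.enumerate A 0).filterMap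
      (fun p => if p.2 == 0 then some p.1 else none)) = zidxFrom 0 A from rfl]
  rw [hsum]
  simp only [add_sub_cancel_right]
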